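-- pv_equiv track=rewrite | github.com/leonw774/lreng | lreng_lexer.py | iter_str_with_position
-- ===== SOURCE A (Python) =====
-- def iter_str_with_position(s: str):
--     line_num = 1
--     col_num = 1
--     for c in s:
--         yield c, (line_num, col_num)
--         if c == '\n':
--             line_num += 1
--             col_num = 1
--         else:
--             col_num += 1
-- ===== SOURCE B (Python) =====
-- def iter_str_with_position(s: str):
--     parts = s.split('\n')
--     line_num = 1
--     for i, part in enumerate(parts):
--         for col, c in enumerate(part, 1):
--             yield c, (line_num, col)
--         if i < len(parts) - 1:
--             yield '\n', (line_num, len(part) + 1)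
--             line_num += 1
-- ===== Notes on version B (the rewrite author's own statement) =====
-- stated objective: alternative
-- what changed: B first splits the input string into its line segments (str.split on the newline character) and derives each column from the character's position within its segment via enumerate(part, 1), emitting the separator token with column len(part)+1 between segments, instead of A's single pass that increments a column counter and resets it at each newline.
import Mathlib
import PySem

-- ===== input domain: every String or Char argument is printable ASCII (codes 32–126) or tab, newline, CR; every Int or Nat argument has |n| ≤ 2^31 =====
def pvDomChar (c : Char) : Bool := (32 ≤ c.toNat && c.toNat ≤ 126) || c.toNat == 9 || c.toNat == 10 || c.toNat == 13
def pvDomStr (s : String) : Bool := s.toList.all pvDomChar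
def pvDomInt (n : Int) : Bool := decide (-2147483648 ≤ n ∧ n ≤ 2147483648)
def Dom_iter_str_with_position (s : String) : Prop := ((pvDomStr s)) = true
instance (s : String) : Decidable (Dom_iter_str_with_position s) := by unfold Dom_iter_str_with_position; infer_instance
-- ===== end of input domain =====

-- B splits the input on '\n' and derives columns from position within each segment
-- (alternative decomposition; same O(n) cost). Both are ported as the list of yielded items.


-- ===== PORT A =====
-- the generator's loop: yield (c, (line, col)); newline resets col and bumps line
def goA : List Char → Int → Int → List (String × (Int × Int))
  | [], _, _ => []
  | c :: cs, ln, col =>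
    (String.mk [c], (ln, col)) ::
      (if c = '\n' then goA cs (ln + 1) 1 else goA cs ln (col + 1))

def iter_str_with_position (s : String) : List (String × (Int × Int)) :=
  goA s.toList 1 1

-- ===== PORT B =====
-- hand port of str.split with the fixed one-character separator '\n'
-- (exact: nonempty separator, no maxsplit; ''.split('\n') == [''])
def splitNL : List Char → List (List Char)
  | [] => [[]]
  | c :: cs =>
    if c = '\n' then [] :: splitNL cs
    else match splitNL cs with
      | [] => [[c]]          -- unreachable: splitNL never returns []
      | p :: ps => (c :: p) :: ps

-- inner loop: for col, c in enumerate(part, 1): yield c, (line_num, col)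
def emitPart (ln : Int) (p : List Char) : List (String × (Int × Int)) :=
  (PySem.List.enumerate p 1).map (fun ic => (String.mk [ic.2], (ln, ic.1)))

-- outer loop over enumerate(parts): after every part but the last, yield '\n' and bump line_num
def goB : List (List Char) → Int → List (String × (Int × Int))
  | [], _ => []
  | [p], ln => emitPart ln p
  | p :: ps, ln => emitPart ln p ++ (("\n", (ln, (p.length : Int) + 1)) :: goB ps (ln + 1))

def iter_str_with_position_alt (s : String) : List (String × (Int × Int)) :=
  goB (splitNL s.toList) 1

-- ===== PRECONDITION & SPEC =====
def Spec_iter_str_with_position (s : String) (out : List (String × (Int × Int))) : Prop := out = iter_str_with_position_alt s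
instance (s : String) (out : List (String × (Int × Int))) : Decidable (Spec_iter_str_with_position s out) := by unfold Spec_iter_str_with_position; infer_instance

-- ===== CLAIM (what is proved, stated in full; the proofs are below) =====
def Claim_equal_iter_str_with_position : Prop := ∀ (s : String), Dom_iter_str_with_position s → Spec_iter_str_with_position s (iter_str_with_position s)

-- ===== LEMMAS AND PROOFS =====

-- emitPart, generalized over the starting column
def emitC : List Char → Int → Int → List (String × (Int × Int))
  | [], _, _ => []
  | c :: p, ln, col => (String.mk [c], (ln, col)) :: emitC p ln (col + 1)

-- goB, generalized over the starting column of the first part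
def goC : List (List Char) → Int → Int → List (String × (Int × Int))
  | [], _, _ => []
  | [p], ln, col => emitC p ln col
  | p :: ps, ln, col => emitC p ln col ++ (("\n", (ln, col + (p.length : Int))) :: goC ps (ln + 1) 1)

theorem goC_one (p : List Char) (ln col : Int) : goC [p] ln col = emitC p ln col := rfl

theorem goC_cons2 (p q : List Char) (qs : List (List Char)) (ln col : Int) :
    goC (p :: q :: qs) ln col =
      emitC p ln col ++ (("\n", (ln, col + (p.length : Int))) :: goC (q :: qs) (ln + 1) 1) := rfl

theorem mkNL : String.mk ['\n'] = "\n" := rfl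

theorem emitPart_eq_emitC (p : List Char) (ln : Int) (n : Int) :
    (PySem.List.enumerate p n).map (fun ic => (String.mk [ic.2], (ln, ic.1))) = emitC p ln n := by
  induction p generalizing n with
  | nil => simp [PySem.List.enumerate_nil, emitC]
  | cons c p ih => simp [PySem.List.enumerate_cons, emitC, ih]

theorem splitNL_ne_nil (cs : List Char) : splitNL cs ≠ [] := by
  cases cs with
  | nil => simp [splitNL]
  | cons c cs =>
    simp only [splitNL]
    split
    · simp
    · cases h : splitNL cs <;> simp

theorem goB_eq_goC (ps : List (List Char)) (ln : Int) : goB ps ln = goC ps ln 1 := by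
  induction ps generalizing ln with
  | nil => rfl
  | cons p ps ih =>
    cases ps with
    | nil => simp [goB, goC_one, emitPart, emitPart_eq_emitC]
    | cons q qs =>
      have h1 : (1 : Int) + (p.length : Int) = (p.length : Int) + 1 := by ring
      simp only [goB, goC_cons2, emitPart, emitPart_eq_emitC, ih, h1]

theorem goA_eq_goC (cs : List Char) (ln col : Int) :
    goA cs ln col = goC (splitNL cs) ln col := by
  induction cs generalizing ln col with
  | nil => simp [goA, splitNL, goC_one, emitC]
  | cons c cs ih =>
    obtain ⟨p, ps, hps⟩ : ∃ p ps, splitNL cs = p :: ps := by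
      cases h : splitNL cs with
      | nil => exact absurd h (splitNL_ne_nil cs)
      | cons p ps => exact ⟨p, ps, rfl⟩
    by_cases hc : c = '\n'
    · subst hc
      simp only [goA, splitNL, hps, ih]
      simp [goC_cons2, emitC, mkNL]
    · simp only [goA, if_neg hc, splitNL, hps, ih]
      cases ps with
      | nil => simp only [goC_one, emitC]
      | cons q qs =>
        have harith : col + ((c :: p).length : Int) = (col + 1) + (p.length : Int) := by
          push_cast [List.length_cons]; ring
        simp only [goC_cons2, emitC, List.cons_append, harith]

-- ===== VERDICT (by name: the statement is the Claim_ definition above) =====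
theorem iter_str_with_position_spec : Claim_equal_iter_str_with_position := by
  intro s _
  unfold Spec_iter_str_with_position iter_str_with_position iter_str_with_position_alt
  rw [goA_eq_goC, goB_eq_goC]
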